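-- pv_equiv track=rewrite | github.com/sajith/pce | LoadBalancing/RandomTopologyGenerator.py | lhsbw
-- ===== SOURCE A (Python) =====
-- import copy
--
-- def zerolistmaker(n):
--     listofzeros = [0] * n
--     return listofzeros
--
-- def lhsbw(request_list, inputmatrix):
--     bwconstraints = []
--     zeros = zerolistmaker(len(inputmatrix[0])*len(request_list))
--     for i in range(len(inputmatrix[0])):
--         addzeros = copy.deepcopy(zeros)
--         bwconstraints.append(addzeros)
--         count = 0
--         for request in request_list:
--             bwconstraints[i][i+count * len(inputmatrix[0])] = request[2]
--             count += 1
--     return bwconstraints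
-- ===== SOURCE B (Python) =====
-- def lhsbw(request_list, inputmatrix):
--     cols = len(inputmatrix[0])
--     rows = [[] for _ in range(cols)]
--     for request in request_list:
--         for i, row in enumerate(rows):
--             row += [0] * i + [request[2]] + [0] * (cols - 1 - i)
--     return rows
-- ===== Notes on version B (the rewrite author's own statement) =====
-- stated objective: alternative
-- what changed: A builds the matrix row-major: for each row it deep-copies a full-width zero row and scatters request[2] into it at i+count*cols; B builds it request-major: it starts from cols empty rows and, for each request, extends every row with that request's diagonal block assembled from zero-run segments [0]*i+[v]+[0]*(cols-1-i), so no pre-allocated zero template, no index arithmetic and no in-place scatter.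
import Mathlib
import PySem

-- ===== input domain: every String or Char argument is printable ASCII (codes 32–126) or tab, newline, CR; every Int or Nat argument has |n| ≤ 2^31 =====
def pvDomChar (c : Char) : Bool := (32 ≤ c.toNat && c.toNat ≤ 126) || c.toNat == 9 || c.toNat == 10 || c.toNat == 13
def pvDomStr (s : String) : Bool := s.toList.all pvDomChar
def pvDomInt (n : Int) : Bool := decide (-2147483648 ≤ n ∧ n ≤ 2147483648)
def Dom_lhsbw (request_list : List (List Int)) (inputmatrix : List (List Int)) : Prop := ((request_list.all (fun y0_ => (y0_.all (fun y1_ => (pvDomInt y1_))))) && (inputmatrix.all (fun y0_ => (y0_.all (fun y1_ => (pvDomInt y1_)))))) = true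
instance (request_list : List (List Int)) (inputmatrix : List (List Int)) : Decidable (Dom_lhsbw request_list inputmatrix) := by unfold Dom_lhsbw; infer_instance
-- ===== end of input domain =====

-- B builds the matrix request-major (extend every row with that request's diagonal
-- block made of zero-run segments) instead of A's row-major zero-template scatter
-- (objective: alternative decomposition, same cost).

-- ===== PORT A =====
def zerolistmakerL (n : Nat) : List Int := List.replicate n 0

-- literal port of A: append a deep copy of the zero row, then scatter request[2]
-- at position i + count*cols while incrementing count.  (Out-of-range accesses that
-- make Python raise are excluded by Pre_lhsbw; there `getD` is exact.)
def lhsbw (request_list : List (List Int)) (inputmatrix : List (List Int)) : List (List Int) :=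
  let cols := (inputmatrix.getD 0 []).length
  let zeros := zerolistmakerL (cols * request_list.length)
  (List.range cols).foldl (fun bwconstraints i =>
    let p := request_list.foldl
      (fun (p : List Int × Nat) request =>
        (p.1.set (i + p.2 * cols) (request.getD 2 0), p.2 + 1))
      (zeros, 0)
    bwconstraints ++ [p.1]) []

-- ===== PORT B =====
-- literal port of B: start from cols empty rows; for each request extend row i
-- (enumerate = mapIdx) with the block [0]*i ++ [request[2]] ++ [0]*(cols-1-i)
def lhsbw_alt (request_list : List (List Int)) (inputmatrix : List (List Int)) : List (List Int) :=
  let cols := (inputmatrix.getD 0 []).length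
  request_list.foldl (fun rows request =>
    rows.mapIdx (fun i row =>
      row ++ (List.replicate i 0 ++ [request.getD 2 0] ++ List.replicate (cols - 1 - i) 0)))
    (List.replicate cols [])

-- ===== PRECONDITION & SPEC =====
-- Pre_ excludes exactly the inputs where Python A raises: empty inputmatrix
-- (IndexError on inputmatrix[0]) and, when there is at least one column, any
-- request shorter than 3 (IndexError on request[2]).  B raises at the same inputs.
def Pre_lhsbw (request_list : List (List Int)) (inputmatrix : List (List Int)) : Prop :=
  inputmatrix ≠ [] ∧
    ((inputmatrix.getD 0 []).length = 0 ∨ ∀ r ∈ request_list, 3 ≤ r.length)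
instance (request_list : List (List Int)) (inputmatrix : List (List Int)) : Decidable (Pre_lhsbw request_list inputmatrix) := by unfold Pre_lhsbw; infer_instance
def pvWitness_lhsbw : List (List Int) × List (List Int) := ([[1, 2, 5], [0, 1, 7]], [[0, 0]])

def Spec_lhsbw (request_list : List (List Int)) (inputmatrix : List (List Int)) (out : List (List Int)) : Prop := out = lhsbw_alt request_list inputmatrix
instance (request_list : List (List Int)) (inputmatrix : List (List Int)) (out : List (List Int)) : Decidable (Spec_lhsbw request_list inputmatrix out) := by unfold Spec_lhsbw; infer_instance

-- ===== CLAIM (what is proved, stated in full; the proofs are below) =====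
def Claim_equal_lhsbw : Prop := ∀ (request_list : List (List Int)) (inputmatrix : List (List Int)), Dom_lhsbw request_list inputmatrix → Pre_lhsbw request_list inputmatrix → Spec_lhsbw request_list inputmatrix (lhsbw request_list inputmatrix)

-- ===== LEMMAS AND PROOFS =====

-- the canonical value both programs compute: row i lists, request after request,
-- the block with request[2] in column i
def canonRow (request_list : List (List Int)) (cols i : Nat) : List Int :=
  request_list.flatMap (fun r =>
    (List.range cols).map (fun j => if j = i then r.getD 2 0 else (0 : Int)))

-- a zero row with one entry scattered in = the canonical block
theorem block_set_eq (cols i : Nat) (v : Int) :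
    (List.replicate cols (0 : Int)).set i v
      = (List.range cols).map (fun j => if j = i then v else (0 : Int)) := by
  apply List.ext_getElem
  · simp
  · intro j hj _
    simp only [List.getElem_set, List.getElem_replicate, List.getElem_map, List.getElem_range]
    by_cases h : i = j
    · simp [h]
    · rw [if_neg h, if_neg (fun hh => h (Eq.symm hh))]

-- B's zero-run block = the canonical block
theorem block_runs_eq (cols i : Nat) (hi : i < cols) (v : Int) :
    List.replicate i (0 : Int) ++ [v] ++ List.replicate (cols - 1 - i) 0
      = (List.range cols).map (fun j => if j = i then v else (0 : Int)) := by
  apply List.ext_getElem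
  · simp; omega
  · intro j hj _
    simp only [List.getElem_map, List.getElem_range]
    by_cases h1 : j < i
    · rw [List.getElem_append_left (by simp; omega),
          List.getElem_append_left (by simpa using h1)]
      simp [Nat.ne_of_lt h1]
    · by_cases h2 : j = i
      · subst h2
        rw [List.getElem_append_left (by simp)]
        rw [List.getElem_append_right (by simp)]
        simp
      · rw [List.getElem_append_right (by simp; omega)]
        simp
        omega

-- mapIdx over a map of range: pointwise action
theorem mapIdx_map_range {α β : Type} (n : Nat) (g : Nat → α) (h : Nat → α → β) :
    (List.map g (List.range n)).mapIdx (fun i row => h i row)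
      = List.map (fun i => h i (g i)) (List.range n) := by
  apply List.ext_getElem
  · simp
  · intro j hj _
    simp

-- B's fold invariant: starting from rows = map f (range cols), each request
-- appends its canonical block to every row
theorem alt_fold_eq (cols : Nat) :
    ∀ (rl : List (List Int)) (f : Nat → List Int),
      (rl.foldl (fun rows request =>
          rows.mapIdx (fun i row =>
            row ++ (List.replicate i 0 ++ [request.getD 2 0] ++ List.replicate (cols - 1 - i) 0)))
        (List.map f (List.range cols)))
      = List.map (fun i => f i ++ canonRow rl cols i) (List.range cols) := by
  intro rl
  induction rl with
  | nil => intro f; simp [canonRow]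
  | cons r rl ih =>
    intro f
    simp only [List.foldl_cons]
    rw [mapIdx_map_range]
    rw [ih (fun i => f i ++ (List.replicate i 0 ++ [r.getD 2 0] ++ List.replicate (cols - 1 - i) 0))]
    apply List.map_congr_left
    intro i hi
    have hi' : i < cols := List.mem_range.mp hi
    rw [block_runs_eq cols i hi']
    simp [canonRow]

-- A's inner scatter loop builds exactly the canonical row
theorem inner_eq (i cols : Nat) (hi : i < cols) :
    ∀ (rl : List (List Int)) (t : List Int) (k0 : Nat), t.length = cols * k0 →
      (rl.foldl
        (fun (p : List Int × Nat) request =>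
          (p.1.set (i + p.2 * cols) (request.getD 2 0), p.2 + 1))
        (t ++ List.replicate (cols * rl.length) 0, k0)).1
      = t ++ canonRow rl cols i := by
  intro rl
  induction rl with
  | nil => intro t k0 _; simp [canonRow]
  | cons r rl ih =>
    intro t k0 ht
    have hsplit : List.replicate (cols * (r :: rl).length) (0 : Int)
        = List.replicate cols 0 ++ List.replicate (cols * rl.length) 0 := by
      rw [← List.replicate_add]
      congr 1
      simp [List.length_cons, Nat.mul_succ, Nat.add_comm]
    have hidx : i + k0 * cols = t.length + i := by
      rw [ht, Nat.mul_comm]; omega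
    have hset : (t ++ (List.replicate cols (0 : Int) ++ List.replicate (cols * rl.length) 0)).set
          (i + k0 * cols) (r.getD 2 0)
        = (t ++ ((List.replicate cols (0 : Int)).set i (r.getD 2 0)
            ++ List.replicate (cols * rl.length) 0)) := by
      rw [hidx, List.set_append, if_neg (by omega)]
      congr 1
      rw [Nat.add_sub_cancel_left, List.set_append, if_pos (by simpa using hi)]
    simp only [List.foldl_cons, hsplit, hset]
    rw [← List.append_assoc]
    rw [ih (t ++ (List.replicate cols (0 : Int)).set i (r.getD 2 0)) (k0 + 1)
        (by simp [ht, Nat.mul_succ])]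
    rw [block_set_eq cols i]
    simp [canonRow]

-- ===== VERDICT (by name: the statement is the Claim_ definition above) =====
theorem lhsbw_spec : Claim_equal_lhsbw := by
  intro request_list inputmatrix _ _
  show lhsbw request_list inputmatrix = lhsbw_alt request_list inputmatrix
  unfold lhsbw lhsbw_alt zerolistmakerL
  rw [PySem.List.foldl_append_singleton_eq_map]
  simp only [List.nil_append]
  have hrep : (List.replicate ((inputmatrix.getD 0 []).length) ([] : List Int))
      = List.map (fun _ => ([] : List Int)) (List.range ((inputmatrix.getD 0 []).length)) := by
    simp [List.map_const']
  rw [hrep, alt_fold_eq]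
  apply List.map_congr_left
  intro i hi
  have hi' : i < (inputmatrix.getD 0 []).length := List.mem_range.mp hi
  have := inner_eq i ((inputmatrix.getD 0 []).length) hi' request_list [] 0 (by simp)
  simpa using this
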